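-- pv_equiv track=rewrite | github.com/namujinju/Developer-Study-note | python/my problem/vowels_consonants.py | vowels_consonants
-- ===== SOURCE A (Python) =====
-- def vowels_consonants(s):
--
--     vowels = ['a', 'e', 'i', 'o', 'u', 'A', 'E', 'I', 'O', 'U']
--
--     #s의 자음과 모음 리스트를 출력해 오름차순 정렬
--     s_vowels = list(sorted([i for i in s if i in vowels]))
--     s_consonants = list(sorted([i for i in s if i not in vowels and i.isalpha()], key = lambda x: str.lower(x)))
--
--     output = []
--
--     for i in s:
--         if i in vowels:
--             output.append(s_vowels.pop()) # 모음인 경우 오름차순 된 리스트의 맨 끝을 출력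
--         elif i == " ":
--             output.append(" ")
--         else:
--             output.append(s_consonants.pop(0)) # 자음인 경우 오름차순 된 리스트의 맨 앞을 출력
--
--     return "".join(output)
-- ===== SOURCE B (Python) =====
-- def vowels_consonants(s):
--     vowels = set('aeiouAEIOU')
--     res = list(s)
--     v_pos = [i for i, ch in enumerate(s) if ch in vowels]
--     c_pos = [i for i, ch in enumerate(s) if ch not in vowels and ch != ' ']
--     v_desc = sorted((ch for ch in s if ch in vowels), reverse=True)
--     c_asc = sorted((ch for ch in s if ch not in vowels and ch != ' '), key=str.lower)
--     for pos, ch in zip(v_pos, v_desc):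
--         res[pos] = ch
--     for pos, ch in zip(c_pos, c_asc):
--         res[pos] = ch
--     return ''.join(res)
-- ===== Notes on version B (the rewrite author's own statement) =====
-- stated objective: alternative
-- what changed: Replaces A's sequential walk that pops two mutable queues by building the vowel/consonant index lists once and scattering the reverse-sorted vowels and case-insensitively sorted consonants into a copy of the string by position.
import Mathlib
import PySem

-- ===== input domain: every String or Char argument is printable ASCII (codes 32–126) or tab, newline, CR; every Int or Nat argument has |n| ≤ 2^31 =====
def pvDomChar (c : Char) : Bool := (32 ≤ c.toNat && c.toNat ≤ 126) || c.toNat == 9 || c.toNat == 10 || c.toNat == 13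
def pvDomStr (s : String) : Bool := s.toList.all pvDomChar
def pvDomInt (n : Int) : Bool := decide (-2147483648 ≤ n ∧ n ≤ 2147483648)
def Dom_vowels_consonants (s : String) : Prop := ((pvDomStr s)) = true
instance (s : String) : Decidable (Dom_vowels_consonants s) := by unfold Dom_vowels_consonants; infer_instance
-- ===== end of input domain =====

-- B replaces A's two-queue popping walk by computing the vowel/consonant position lists once
-- and scattering the sorted pools into a copy of the string by index.

-- ===== PORT A =====
def pyVowels : List Char := ['a', 'e', 'i', 'o', 'u', 'A', 'E', 'I', 'O', 'U']

-- A's for-loop: vowels are popped from the END of the ascending vowel list,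
-- everything that is neither a vowel nor ' ' pops the FRONT of the consonant list;
-- none = IndexError (list.pop on an empty list).
def vcLoopA : List Char → List Char → List Char → Option (List Char)
  | [], _, _ => some []
  | c :: rest, vs, cs =>
    if pyVowels.contains c then
      match vs.getLast? with
      | none => none
      | some v => (vcLoopA rest vs.dropLast cs).map (fun out => v :: out)
    else if c == ' ' then (vcLoopA rest vs cs).map (fun out => ' ' :: out)
    else
      match cs with
      | [] => none
      | h :: t => (vcLoopA rest vs t).map (fun out => h :: out)

def vowels_consonants (s : String) : String :=
  let sVowels := PySem.List.sorted (s.toList.filter (fun i => pyVowels.contains i)) (fun x => x) false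
  let sConsonants := PySem.List.sorted
      (s.toList.filter (fun i => !pyVowels.contains i && PySem.Chars.isalpha i))
      (fun x => PySem.Chars.lowerChar x) false
  match vcLoopA s.toList sVowels sConsonants with
  | some out => String.ofList out
  | none => ""   -- Python raises IndexError here; excluded by Pre_

-- ===== PORT B =====
def vowelSet : PySem.Set Char := PySem.Set.ofList "aeiouAEIOU".toList

def vowels_consonants_alt (s : String) : String :=
  let l := s.toList
  let vPos := ((PySem.List.enumerate l).filter (fun p => PySem.Set.contains vowelSet p.2)).map (fun p => p.1)
  let cPos := ((PySem.List.enumerate l).filter (fun p => !PySem.Set.contains vowelSet p.2 && p.2 != ' ')).map (fun p => p.1)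
  let vDesc := PySem.List.sorted (l.filter (fun ch => PySem.Set.contains vowelSet ch)) (fun x => x) true
  let cAsc := PySem.List.sorted (l.filter (fun ch => !PySem.Set.contains vowelSet ch && ch != ' '))
      (fun x => PySem.Chars.lowerChar x) false
  let res1 := (vPos.zip vDesc).foldl (fun r pc => PySem.List.pySetD r pc.1 pc.2) l
  let res2 := (cPos.zip cAsc).foldl (fun r pc => PySem.List.pySetD r pc.1 pc.2) res1
  String.ofList res2

-- ===== PRECONDITION & SPEC =====
-- Pre_ excludes exactly the strings with a character that is neither alphabetic nor ' ':
-- on those A always raises IndexError (the extra pop(0) calls outrun the consonant pool).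
def Pre_vowels_consonants (s : String) : Prop :=
  (s.toList.all (fun c => PySem.Chars.isalpha c || c == ' ')) = true
instance (s : String) : Decidable (Pre_vowels_consonants s) := by unfold Pre_vowels_consonants; infer_instance

def pvWitness_vowels_consonants : String := "Hello World"

def Spec_vowels_consonants (s : String) (out : String) : Prop := out = vowels_consonants_alt s
instance (s : String) (out : String) : Decidable (Spec_vowels_consonants s out) := by unfold Spec_vowels_consonants; infer_instance

-- ===== CLAIM (what is proved, stated in full; the proofs are below) =====
def Claim_equal_vowels_consonants : Prop := ∀ (s : String), Dom_vowels_consonants s → Pre_vowels_consonants s → Spec_vowels_consonants s (vowels_consonants s)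

-- ===== LEMMAS AND PROOFS =====

def isVow (c : Char) : Bool := pyVowels.contains c
def isCon (c : Char) : Bool := !pyVowels.contains c && c != ' '

-- the common reference walk: consume vq at vowels, cq at other non-space chars, keep the char when a pool is empty
def walkW : List Char → List Char → List Char → List Char
  | [], _, _ => []
  | c :: t, vq, cq =>
    if isVow c then
      match vq with
      | [] => c :: walkW t [] cq
      | v :: vr => v :: walkW t vr cq
    else if c == ' ' then c :: walkW t vq cq
    else
      match cq with
      | [] => c :: walkW t vq []
      | h :: r => h :: walkW t vq r

-- replace the pr-positions of l by successive elements of q (keep the char when q runs out)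
def replOne (pr : Char → Bool) : List Char → List Char → List Char
  | [], _ => []
  | c :: t, q =>
    if pr c then
      match q with
      | [] => c :: replOne pr t []
      | h :: r => h :: replOne pr t r
    else c :: replOne pr t q

-- the index list B scatters into (enumerate-filter-map), with explicit start
def posL (pr : Char → Bool) (l : List Char) (s : Int) : List Int :=
  ((PySem.List.enumerate l s).filter (fun p => pr p.2)).map (fun p => p.1)

theorem replOne_nil_right (pr : Char → Bool) : ∀ l, replOne pr l [] = l := by
  intro l
  induction l with
  | nil => rfl
  | cons c t ih => simp only [replOne, ih]; split <;> rfl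

theorem enumerate_shift {α : Type} (l : List α) : ∀ s : Int,
    PySem.List.enumerate l (s + 1) = (PySem.List.enumerate l s).map (fun p => (p.1 + 1, p.2)) := by
  induction l with
  | nil => intro s; simp [PySem.List.enumerate_nil]
  | cons c t ih =>
    intro s
    rw [PySem.List.enumerate_cons, PySem.List.enumerate_cons, ih (s + 1), ih s, List.map_cons,
      List.map_map]

theorem posL_cons (pr : Char → Bool) (c : Char) (t : List Char) (s : Int) :
    posL pr (c :: t) s = (if pr c then [s] else []) ++ posL pr t (s + 1) := by
  unfold posL
  rw [PySem.List.enumerate_cons, List.filter_cons]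
  cases hc : pr c <;> simp [hc]

theorem posL_shift (pr : Char → Bool) (l : List Char) (s : Int) :
    posL pr l (s + 1) = (posL pr l s).map (fun i => i + 1) := by
  unfold posL
  rw [enumerate_shift l s, List.filter_map, List.map_map, List.map_map]
  rfl

theorem posL_nonneg (pr : Char → Bool) (l : List Char) (s : Int) :
    ∀ i ∈ posL pr l s, s ≤ i := by
  intro i hi
  rcases List.mem_map.1 hi with ⟨p, hp, rfl⟩
  rcases (PySem.List.mem_enumerate_iff _ _ _).1 (List.mem_filter.1 hp).1 with ⟨k, hk, rfl⟩
  omega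

theorem shiftFold (pairs : List (Int × Char)) (a : Char) : ∀ (m : List Char),
    (∀ p ∈ pairs, 1 ≤ p.1) →
    pairs.foldl (fun r pc => PySem.List.pySetD r pc.1 pc.2) (a :: m)
      = a :: (pairs.map (fun pc => (pc.1 - 1, pc.2))).foldl (fun r pc => PySem.List.pySetD r pc.1 pc.2) m := by
  induction pairs with
  | nil => intro m _; rfl
  | cons pc rest ih =>
    intro m hpos
    have h1 : (1 : Int) ≤ pc.1 := hpos pc (by simp)
    have hset : PySem.List.pySetD (a :: m) pc.1 pc.2 = a :: PySem.List.pySetD m (pc.1 - 1) pc.2 := by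
      rw [PySem.List.pySetD_of_nonneg _ _ (by omega), PySem.List.pySetD_of_nonneg _ _ (by omega)]
      have h2 : pc.1.toNat = (pc.1 - 1).toNat + 1 := by omega
      rw [h2]; rfl
    simp only [List.foldl_cons, List.map_cons, hset]
    exact ih (PySem.List.pySetD m (pc.1 - 1) pc.2) (fun p hp => hpos p (by simp [hp]))

theorem zip_shift_cancel (xs : List Int) (r : List Char) :
    ((xs.zip r).map (Prod.map (fun i => i + 1) id)).map (fun pc => (pc.1 - 1, pc.2)) = xs.zip r := by
  have h : ∀ x ∈ xs.zip r, ((fun pc : Int × Char => (pc.1 - 1, pc.2)) ∘ Prod.map (fun i => i + 1) id) x = x := by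
    intro x _; cases x; simp [Prod.map]
  rw [List.map_map, List.map_congr_left h]
  simp

theorem zip_shift_pos (xs : List Int) (r : List Char) (hx : ∀ i ∈ xs, 0 ≤ i) :
    ∀ p ∈ (xs.zip r).map (Prod.map (fun i => i + 1) id), 1 ≤ p.1 := by
  intro p hp
  rcases List.mem_map.1 hp with ⟨pc, hpc, rfl⟩
  obtain ⟨a, b⟩ := pc
  have := hx a (List.of_mem_zip hpc).1
  simp only [Prod.map]
  omega

theorem scatter_eq_replOne (pr : Char → Bool) : ∀ (l q : List Char),
    ((posL pr l 0).zip q).foldl (fun r pc => PySem.List.pySetD r pc.1 pc.2) l = replOne pr l q := by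
  intro l
  induction l with
  | nil => intro q; rfl
  | cons c t ih =>
    intro q
    have hpos1 : posL pr (c :: t) 0 = (if pr c then [(0 : Int)] else []) ++ (posL pr t 0).map (fun i => i + 1) := by
      rw [posL_cons, posL_shift]
    have hnn : ∀ i ∈ (posL pr t 0), 0 ≤ i := posL_nonneg pr t 0
    by_cases hc : pr c
    · cases q with
      | nil => simp [hpos1, hc, List.zip_nil_right, replOne, replOne_nil_right]
      | cons h r =>
        rw [hpos1, if_pos hc]
        have hset0 : PySem.List.pySetD (c :: t) 0 h = h :: t := by
          rw [PySem.List.pySetD_of_nonneg _ _ (by omega)]; rfl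
        have hzl : ((posL pr t 0).map (fun i => i + 1)).zip r
            = ((posL pr t 0).zip r).map (Prod.map (fun i => i + 1) id) := List.zip_map_left
        simp only [List.singleton_append, List.zip_cons_cons, List.foldl_cons, hset0, hzl]
        rw [shiftFold _ h t (zip_shift_pos _ _ hnn), zip_shift_cancel, ih r]
        simp [replOne, hc]
    · rw [hpos1, if_neg hc]
      have hzl : ((posL pr t 0).map (fun i => i + 1)).zip q
          = ((posL pr t 0).zip q).map (Prod.map (fun i => i + 1) id) := List.zip_map_left
      simp only [List.nil_append, hzl]
      rw [shiftFold _ c t (zip_shift_pos _ _ hnn), zip_shift_cancel, ih q]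
      simp [replOne, hc]

-- positions of q-chars are unchanged by replacing pr-positions with pr-chars
theorem posL_replOne (pr q : Char → Bool) (hpq : ∀ c, pr c = true → q c = false) :
    ∀ (l vq : List Char) (s : Int), (∀ v ∈ vq, pr v = true) →
    posL q (replOne pr l vq) s = posL q l s := by
  intro l
  induction l with
  | nil => intro vq s _; rfl
  | cons c t ih =>
    intro vq s hv
    by_cases hc : pr c
    · cases vq with
      | nil =>
        rw [show replOne pr (c :: t) [] = c :: replOne pr t [] from by simp [replOne, hc]]
        rw [posL_cons, posL_cons, ih [] (s + 1) (by simp)]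
      | cons v vr =>
        have hqv : q v = false := hpq v (hv v (by simp))
        have hqc : q c = false := hpq c hc
        rw [show replOne pr (c :: t) (v :: vr) = v :: replOne pr t vr from by simp [replOne, hc]]
        rw [posL_cons, posL_cons, hqv, hqc, ih vr (s + 1) (fun x hx => hv x (by simp [hx]))]
    · rw [show replOne pr (c :: t) vq = c :: replOne pr t vq from by simp [replOne, hc]]
      rw [posL_cons, posL_cons, ih vq (s + 1) hv]

theorem repl_repl_eq_walk : ∀ (l vq cq : List Char), (∀ v ∈ vq, isVow v = true) →
    replOne isCon (replOne isVow l vq) cq = walkW l vq cq := by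
  intro l
  induction l with
  | nil => intro vq cq _; rfl
  | cons c t ih =>
    intro vq cq hv
    by_cases hc : isVow c
    · cases vq with
      | nil =>
        have h1 : isCon c = false := by unfold isCon; rw [show pyVowels.contains c = true from hc]; rfl
        simp [replOne, walkW, hc, h1, ih [] cq (by simp)]
      | cons v vr =>
        have hvv : isVow v = true := hv v (by simp)
        have h1 : isCon v = false := by unfold isCon; rw [show pyVowels.contains v = true from hvv]; rfl
        simp [replOne, walkW, hc, h1, ih vr cq (fun x hx => hv x (by simp [hx]))]
    · by_cases hsp : c = ' '
      · subst hsp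
        have h1 : isCon ' ' = false := by decide
        simp [replOne, walkW, hc, h1, ih vq cq hv]
      · have hcb : pyVowels.contains c = false := by
          simpa [isVow] using hc
        have hcon : isCon c = true := by unfold isCon; rw [hcb]; simp [hsp]
        cases cq with
        | nil => simp [replOne, walkW, hc, hcon, hsp, ih vq [] hv]
        | cons h r => simp [replOne, walkW, hc, hcon, hsp, ih vq r hv]

theorem loopA_eq_walk : ∀ (l vs cs : List Char),
    vs.length = l.countP isVow → cs.length = l.countP isCon →
    vcLoopA l vs cs = some (walkW l vs.reverse cs) := by
  intro l
  induction l with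
  | nil =>
    intro vs cs h1 _
    have hvs : vs = [] := List.length_eq_zero_iff.mp (by simpa using h1)
    subst hvs
    simp [vcLoopA, walkW]
  | cons c t ih =>
    intro vs cs h1 h2
    by_cases hc : isVow c
    · have hcb : pyVowels.contains c = true := hc
      have hcon : isCon c = false := by unfold isCon; rw [hcb]; rfl
      have h1' : vs.length = t.countP isVow + 1 := by
        rw [h1, List.countP_cons, if_pos hc]
      have hne : vs ≠ [] := by intro h; subst h; simp at h1'
      have hlast : vs.getLast? = some (vs.getLast hne) := List.getLast?_eq_some_getLast hne
      have hrev : vs.reverse = vs.getLast hne :: vs.dropLast.reverse := by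
        conv_lhs => rw [← List.dropLast_append_getLast hne]
        simp
      have hdl : vs.dropLast.length = t.countP isVow := by
        rw [List.length_dropLast, h1']; omega
      have h2' : cs.length = t.countP isCon := by
        rw [h2, List.countP_cons, if_neg (by simp [hcon])]; omega
      simp only [vcLoopA, hcb, if_pos, hlast]
      rw [ih vs.dropLast cs hdl h2']
      simp [walkW, hc, hrev]
    · have hcb : pyVowels.contains c = false := by simpa [isVow] using hc
      by_cases hsp : c = ' '
      · subst hsp
        have h1' : vs.length = t.countP isVow := by
          rw [h1, List.countP_cons, if_neg (by simp [hc])]; omega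
        have h2' : cs.length = t.countP isCon := by
          rw [h2, List.countP_cons, if_neg (by decide)]; omega
        simp only [vcLoopA, hcb]
        rw [ih vs cs h1' h2']
        simp [walkW, hc]
      · have hcb2 : pyVowels.contains c = false := by simpa [isVow] using hc
        have hcon : isCon c = true := by unfold isCon; rw [hcb2]; simp [hsp]
        have h2' : cs.length = t.countP isCon + 1 := by rw [h2, List.countP_cons, if_pos hcon]
        have hne : cs ≠ [] := by intro h; subst h; simp at h2'
        obtain ⟨h, r, rfl⟩ := List.exists_cons_of_ne_nil hne
        have h1' : vs.length = t.countP isVow := by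
          rw [h1, List.countP_cons, if_neg (by simp [hc])]; omega
        have h2'' : r.length = t.countP isCon := by simp at h2'; omega
        have hspb : (c == ' ') = false := by simp [hsp]
        simp only [vcLoopA, hcb, hspb]
        rw [ih vs r h1' h2'']
        simp [walkW, hc, hsp]

theorem sorted_rev_eq_reverse (xs : List Char) :
    PySem.List.sorted xs (fun x => x) true = (PySem.List.sorted xs (fun x => x) false).reverse := by
  have h : (PySem.List.sorted xs (fun x => x) true).reverse = PySem.List.sorted xs (fun x => x) false := by
    apply PySem.List.eq_of_perm_of_pairwise_le_of_injective (fun x => x) (fun a b hab => hab)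
    · exact ((List.reverse_perm _).trans (PySem.List.sorted_perm xs _ true)).trans (PySem.List.sorted_perm xs _ false).symm
    · rw [List.pairwise_reverse]
      exact PySem.List.sorted_pairwise_rev xs _
    · exact PySem.List.sorted_pairwise xs _
  rw [← h, List.reverse_reverse]

theorem contains_vowelSet (c : Char) : PySem.Set.contains vowelSet c = pyVowels.contains c := by
  have h : vowelSet = pyVowels := by decide
  rw [PySem.Set.contains, h]

-- ===== VERDICT (by name: the statement is the Claim_ definition above) =====
theorem vowels_consonants_spec : Claim_equal_vowels_consonants := by
  intro s _ hpre0
  have hpre : ∀ c ∈ s.toList, PySem.Chars.isalpha c = true ∨ c = ' ' := by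
    intro c hc
    have h := List.all_eq_true.mp hpre0 c hc
    rcases Bool.or_eq_true_iff.mp h with h | h
    · exact Or.inl h
    · exact Or.inr (by exact beq_iff_eq.mp h)
  simp only [Spec_vowels_consonants, vowels_consonants, vowels_consonants_alt, contains_vowelSet]
  have hcpool : s.toList.filter (fun i => !pyVowels.contains i && PySem.Chars.isalpha i)
      = s.toList.filter (fun ch => !pyVowels.contains ch && ch != ' ') := by
    apply List.filter_congr
    intro x hx
    rcases hpre x hx with hal | hspx
    · have hxs : (x != ' ') = true := by
        simp only [bne_iff_ne, ne_eq]
        intro hx'; subst hx'; exact absurd hal (by decide)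
      rw [hal, hxs]
    · subst hspx
      rw [show PySem.Chars.isalpha ' ' = false from by decide]
      simp
  rw [hcpool]
  have e1 : (fun i : Char => pyVowels.contains i) = isVow := rfl
  have e2 : (fun ch : Char => !pyVowels.contains ch && ch != ' ') = isCon := rfl
  have e3 : (fun p : Int × Char => pyVowels.contains p.2) = (fun p => isVow p.2) := rfl
  have e4 : (fun p : Int × Char => !pyVowels.contains p.2 && p.2 != ' ') = (fun p => isCon p.2) := rfl
  rw [e1, e2, e3, e4]
  have hVlen : (PySem.List.sorted (s.toList.filter isVow) (fun x => x) false).length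
      = s.toList.countP isVow := by
    rw [PySem.List.length_sorted, ← List.countP_eq_length_filter]
  have hClen : (PySem.List.sorted (s.toList.filter isCon) (fun x => PySem.Chars.lowerChar x) false).length
      = s.toList.countP isCon := by
    rw [PySem.List.length_sorted, ← List.countP_eq_length_filter]
  rw [loopA_eq_walk _ _ _ hVlen hClen, sorted_rev_eq_reverse]
  have hvq : ∀ v ∈ (PySem.List.sorted (s.toList.filter isVow) (fun x => x) false).reverse,
      isVow v = true := by
    intro v hv
    have hv' : v ∈ PySem.List.sorted (s.toList.filter isVow) (fun x => x) false :=
      List.mem_reverse.1 hv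
    rw [PySem.List.mem_sorted] at hv'
    exact (List.mem_filter.1 hv').2
  have hpq : ∀ c, isVow c = true → isCon c = false := by
    intro c h
    unfold isVow at h
    unfold isCon
    rw [h]; rfl
  rw [show ((PySem.List.enumerate s.toList).filter (fun p => isVow p.2)).map (fun p => p.1)
        = posL isVow s.toList 0 from rfl,
      show ((PySem.List.enumerate s.toList).filter (fun p => isCon p.2)).map (fun p => p.1)
        = posL isCon s.toList 0 from rfl,
      scatter_eq_replOne isVow s.toList _,
      ← posL_replOne isVow isCon hpq s.toList _ 0 hvq,
      scatter_eq_replOne isCon _ _,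
      repl_repl_eq_walk _ _ _ hvq]
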